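-- pv_equiv track=rewrite | github.com/andria009/RespondOR-EvacuationRoute | src/visualization/visualizer.py | _quintile_class_list
-- ===== SOURCE A (Python) =====
-- def _quintile_class_list(values: list) -> list:
--     """Assign 1–5 quintile class to each value in the list."""
--     if not values:
--         return []
--     nonzero = sorted(v for v in values if v > 0)
--     if not nonzero:
--         return [1] * len(values)
--     m = len(nonzero)
--     q = [nonzero[max(0, int(p / 100 * m) - 1)] for p in [20, 40, 60, 80]]
--     result = []
--     for v in values:
--         if v <= 0:       result.append(1)
--         elif v <= q[0]:  result.append(1)
--         elif v <= q[1]:  result.append(2)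
--         elif v <= q[2]:  result.append(3)
--         elif v <= q[3]:  result.append(4)
--         else:            result.append(5)
--     return result
-- ===== SOURCE B (Python) =====
-- def _quintile_class_list(values: list) -> list:
--     """Assign 1-5 quintile class to each value in the list."""
--     if not values:
--         return []
--     nonzero = [v for v in values if v > 0]
--     m = len(nonzero)
--     if m == 0:
--         return [1] * len(values)
--
--     def select(xs, k):
--         # k-th smallest (0-based) by quickselect, O(len(xs)) average
--         while True:
--             pivot = xs[0]
--             lt = [x for x in xs if x < pivot]
--             if k < len(lt):
--                 xs = lt
--                 continue
--             eq = [x for x in xs if x == pivot]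
--             if k < len(lt) + len(eq):
--                 return pivot
--             k -= len(lt) + len(eq)
--             xs = [x for x in xs if x > pivot]
--
--     thresholds = [select(nonzero, max(0, p * m // 100 - 1)) for p in (20, 40, 60, 80)]
--     return [1 if v <= 0 else 1 + sum(t < v for t in thresholds) for v in values]
-- ===== Notes on version B (the rewrite author's own statement) =====
-- stated objective: alternative
-- what changed: B replaces A's full sort of the positive values by a quickselect (head-pivot three-way partition) for each of the four quintile thresholds, and replaces A's if-elif classification chain by counting how many thresholds lie below each value.
import Mathlib
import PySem

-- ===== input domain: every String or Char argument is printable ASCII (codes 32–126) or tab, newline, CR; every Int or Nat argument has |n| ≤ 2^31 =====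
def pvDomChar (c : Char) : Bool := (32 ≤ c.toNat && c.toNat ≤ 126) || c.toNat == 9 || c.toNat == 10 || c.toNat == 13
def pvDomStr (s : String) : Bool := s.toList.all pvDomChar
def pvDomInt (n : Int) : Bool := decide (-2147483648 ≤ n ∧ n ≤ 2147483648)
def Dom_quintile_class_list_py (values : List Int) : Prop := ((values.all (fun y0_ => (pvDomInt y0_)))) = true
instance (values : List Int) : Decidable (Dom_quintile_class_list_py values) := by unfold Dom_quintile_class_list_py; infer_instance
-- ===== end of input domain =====

-- B replaces A's full sort of the positive values by quickselect for the four quintile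
-- thresholds plus a counting classification pass (alternative algorithm, not measured faster).

-- ===== PORT A =====
-- Python's `int(p / 100 * m)` (float) is ported as integer floor division p*m//100: for
-- p ∈ {20,40,60,80} the double nearest to p/100 has relative error < 2^-54, so the floor of the
-- rounded product agrees with ⌊p*m/100⌋ for every list length m ≤ 2^31 — exact on this domain.
def quintile_class_list_py (values : List Int) : List Int :=
  if values = [] then []
  else
    let nonzero := PySem.List.sorted (values.filter (fun v => decide (0 < v))) (fun x => x) false
    if nonzero = [] then List.replicate values.length 1
    else
      let m : Int := nonzero.length
      -- index max(0, p*m//100 - 1) is always in range, so getD's default is never used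
      let q : List Int := ([20, 40, 60, 80] : List Int).map
        (fun p => (PySem.List.pyGet? nonzero (max 0 (PySem.Int.floordiv (p * m) 100 - 1))).getD 0)
      values.foldl (fun result v =>
        if v ≤ 0 then result ++ [1]
        else if v ≤ q[0]! then result ++ [1]
        else if v ≤ q[1]! then result ++ [2]
        else if v ≤ q[2]! then result ++ [3]
        else if v ≤ q[3]! then result ++ [4]
        else result ++ [5]) []

-- ===== PORT B =====
-- termination helper for pvSelect: filtering with a predicate false at the head shrinks the list
theorem pvFilter_lt_length (p : Int) (t : List Int) (f : Int → Bool) (h : f p = false) :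
    ((p :: t).filter f).length < (p :: t).length := by
  simp [h]
  exact List.length_filter_le f t

-- Source B's `select`: k-th smallest (0-based) by quickselect, head as pivot
def pvSelect : List Int → Nat → Int
  | [], _ => 0   -- unreachable: callers keep k < length
  | p :: t, k =>
    let lt := (p :: t).filter (fun x => decide (x < p))
    if k < lt.length then pvSelect lt k
    else
      let eq := (p :: t).filter (fun x => decide (x = p))
      if k < lt.length + eq.length then p
      else pvSelect ((p :: t).filter (fun x => decide (p < x))) (k - (lt.length + eq.length))
termination_by xs _ => xs.length
decreasing_by
  · exact pvFilter_lt_length p t _ (by simp)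
  · exact pvFilter_lt_length p t _ (by simp)

def quintile_class_list_py_alt (values : List Int) : List Int :=
  if values = [] then []
  else
    let nonzero := values.filter (fun v => decide (0 < v))
    let m : Int := nonzero.length
    if m = 0 then List.replicate values.length 1
    else
      let thresholds := ([20, 40, 60, 80] : List Int).map
        (fun p => pvSelect nonzero (max 0 (PySem.Int.floordiv (p * m) 100 - 1)).toNat)
      values.map (fun v =>
        if v ≤ 0 then 1
        else 1 + thresholds.foldl (fun acc t => acc + (if t < v then 1 else 0)) 0)

-- ===== PRECONDITION & SPEC =====
def Spec_quintile_class_list_py (values : List Int) (out : List Int) : Prop := out = quintile_class_list_py_alt values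
instance (values : List Int) (out : List Int) : Decidable (Spec_quintile_class_list_py values out) := by unfold Spec_quintile_class_list_py; infer_instance

-- ===== CLAIM (what is proved, stated in full; the proofs are below) =====
def Claim_equal_quintile_class_list_py : Prop := ∀ (values : List Int), Dom_quintile_class_list_py values → Spec_quintile_class_list_py values (quintile_class_list_py values)

-- ===== LEMMAS AND PROOFS =====

-- the three pivot filters are a permutation of the list
theorem pv_partition_perm (p : Int) : ∀ xs : List Int,
    (xs.filter (fun x => decide (x < p)) ++ (xs.filter (fun x => decide (x = p)) ++ xs.filter (fun x => decide (p < x)))).Perm xs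
  | [] => by simp
  | a :: t => by
    have ih := pv_partition_perm p t
    by_cases h1 : a < p
    · have e1 : (a :: t).filter (fun x => decide (x < p)) = a :: t.filter (fun x => decide (x < p)) := by
        simp [h1]
      have e2 : (a :: t).filter (fun x => decide (x = p)) = t.filter (fun x => decide (x = p)) := by
        simp [show a ≠ p by omega]
      have e3 : (a :: t).filter (fun x => decide (p < x)) = t.filter (fun x => decide (p < x)) := by
        simp [show ¬ p < a by omega]
      rw [e1, e2, e3]
      exact ih.cons a
    · by_cases h2 : a = p
      · subst h2
        have e1 : (a :: t).filter (fun x => decide (x < a)) = t.filter (fun x => decide (x < a)) := by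
          simp
        have e2 : (a :: t).filter (fun x => decide (x = a)) = a :: t.filter (fun x => decide (x = a)) := by
          simp
        have e3 : (a :: t).filter (fun x => decide (a < x)) = t.filter (fun x => decide (a < x)) := by
          simp
        rw [e1, e2, e3]
        exact List.Perm.trans List.perm_middle (ih.cons a)
      · have h3 : p < a := by omega
        have e1 : (a :: t).filter (fun x => decide (x < p)) = t.filter (fun x => decide (x < p)) := by
          simp [h1]
        have e2 : (a :: t).filter (fun x => decide (x = p)) = t.filter (fun x => decide (x = p)) := by
          simp [h2]
        have e3 : (a :: t).filter (fun x => decide (p < x)) = a :: t.filter (fun x => decide (p < x)) := by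
          simp [h3]
        rw [e1, e2, e3, show t.filter (fun x => decide (x < p)) ++ (t.filter (fun x => decide (x = p)) ++ a :: t.filter (fun x => decide (p < x))) = (t.filter (fun x => decide (x < p)) ++ t.filter (fun x => decide (x = p))) ++ a :: t.filter (fun x => decide (p < x)) from (List.append_assoc _ _ _).symm]
        refine List.Perm.trans List.perm_middle ?_
        refine List.Perm.cons a ?_
        refine List.Perm.trans ?_ ih
        rw [List.append_assoc]
-- sorted list decomposes around any pivot into sorted-below ++ equal ++ sorted-above
theorem pv_sorted_partition (p : Int) (xs : List Int) :
    PySem.List.sorted xs (fun x => x) false =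
      PySem.List.sorted (xs.filter (fun x => decide (x < p))) (fun x => x) false
      ++ (xs.filter (fun x => decide (x = p))
      ++ PySem.List.sorted (xs.filter (fun x => decide (p < x))) (fun x => x) false) := by
  apply PySem.List.sorted_id_eq_of_perm_of_pairwise
  · refine List.Perm.trans ?_ (pv_partition_perm p xs)
    exact List.Perm.append (PySem.List.sorted_perm _ _ _)
      (List.Perm.append (List.Perm.refl _) (PySem.List.sorted_perm _ _ _))
  · rw [List.pairwise_append]
    refine ⟨by simpa using PySem.List.sorted_pairwise (xs.filter (fun x => decide (x < p))) (fun x => x), ?_, ?_⟩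
    · rw [List.pairwise_append]
      refine ⟨?_, by simpa using PySem.List.sorted_pairwise (xs.filter (fun x => decide (p < x))) (fun x => x), ?_⟩
      · refine List.pairwise_of_forall_mem_list ?_
        intro a ha b hb
        simp only [List.mem_filter, decide_eq_true_eq] at ha hb
        omega
      · intro a ha b hb
        rw [PySem.List.mem_sorted] at hb
        simp only [List.mem_filter, decide_eq_true_eq] at ha hb
        omega
    · intro a ha b hb
      rw [PySem.List.mem_sorted] at ha
      rw [List.mem_append] at hb
      rcases hb with hb | hb
      · simp only [List.mem_filter, decide_eq_true_eq] at ha hb; omega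
      · rw [PySem.List.mem_sorted] at hb
        simp only [List.mem_filter, decide_eq_true_eq] at ha hb; omega

-- quickselect computes order statistics of the sorted list (fueled strong induction)
theorem pvSelect_aux : ∀ (n : Nat), ∀ (xs : List Int) (k : Nat), xs.length ≤ n → k < xs.length →
    (PySem.List.sorted xs (fun x => x) false)[k]? = some (pvSelect xs k)
  | 0, xs, k, hle, hk => by omega
  | n + 1, [], k, hle, hk => by simp at hk
  | n + 1, p :: t, k, hle, hk => by
    have hpart := pv_sorted_partition p (p :: t)
    have hLT : ((p :: t).filter (fun x => decide (x < p))).length < (p :: t).length :=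
      pvFilter_lt_length p t _ (by simp)
    have hGT : ((p :: t).filter (fun x => decide (p < x))).length < (p :: t).length :=
      pvFilter_lt_length p t _ (by simp)
    have hlen : (p :: t).length =
        ((p :: t).filter (fun x => decide (x < p))).length
        + (((p :: t).filter (fun x => decide (x = p))).length
        + ((p :: t).filter (fun x => decide (p < x))).length) := by
      have := (pv_partition_perm p (p :: t)).length_eq
      simp only [List.length_append] at this
      omega
    rw [pvSelect, hpart]
    by_cases h1 : k < ((p :: t).filter (fun x => decide (x < p))).length
    · rw [if_pos h1, List.getElem?_append_left (by rw [PySem.List.length_sorted]; exact h1)]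
      exact pvSelect_aux n _ k (by omega) h1
    · rw [if_neg h1,
        List.getElem?_append_right (by rw [PySem.List.length_sorted]; omega),
        PySem.List.length_sorted]
      by_cases h2 : k < ((p :: t).filter (fun x => decide (x < p))).length
          + ((p :: t).filter (fun x => decide (x = p))).length
      · rw [if_pos h2]
        have hk2 : k - ((p :: t).filter (fun x => decide (x < p))).length
            < ((p :: t).filter (fun x => decide (x = p))).length := by omega
        rw [List.getElem?_append_left hk2, List.getElem?_eq_getElem hk2]
        have hmem := List.getElem_mem hk2
        simp only [List.mem_filter, decide_eq_true_eq] at hmem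
        rw [hmem.2]
      · rw [if_neg h2, List.getElem?_append_right (by omega)]
        have := pvSelect_aux n ((p :: t).filter (fun x => decide (p < x)))
          (k - (((p :: t).filter (fun x => decide (x < p))).length
            + ((p :: t).filter (fun x => decide (x = p))).length)) (by omega) (by omega)
        rw [Nat.sub_sub] at *
        exact this

theorem pvSelect_eq_sorted (xs : List Int) (k : Nat) (hk : k < xs.length) :
    (PySem.List.sorted xs (fun x => x) false)[k]? = some (pvSelect xs k) :=
  pvSelect_aux xs.length xs k le_rfl hk

-- appending one classified element per iteration is a map
theorem pv_foldl_map (g : Int → Int) : ∀ (l : List Int) (init : List Int),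
    l.foldl (fun r v => r ++ [g v]) init = init ++ l.map g
  | [], init => by simp
  | v :: t, init => by
    simp only [List.foldl_cons, List.map_cons]
    rw [pv_foldl_map g t (init ++ [g v])]
    simp

-- one threshold: A's sorted-list lookup = B's quickselect, for an in-range index
theorem pv_threshold_eq (F : List Int) (i : Int) (h0 : 0 ≤ i) (hi : i < (F.length : Int)) :
    ((PySem.List.pyGet? (PySem.List.sorted F (fun x => x) false) i).getD 0) = pvSelect F i.toNat := by
  rw [PySem.List.pyGet?_of_nonneg _ h0, pvSelect_eq_sorted F i.toNat (by omega)]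
  rfl

-- quickselect is monotone in the rank
theorem pv_select_mono (F : List Int) (i j : Nat) (hij : i ≤ j) (hj : j < F.length) :
    pvSelect F i ≤ pvSelect F j := by
  have hlen : (PySem.List.sorted F (fun x => x) false).length = F.length := by
    rw [PySem.List.length_sorted]
  have hi := pvSelect_eq_sorted F i (by omega)
  have hjj := pvSelect_eq_sorted F j hj
  rcases eq_or_lt_of_le hij with rfl | hlt
  · exact le_refl _
  · have hp : (PySem.List.sorted F (fun x => x) false).Pairwise (fun a b : Int => a ≤ b) := by
      simpa using PySem.List.sorted_pairwise F (fun x => x)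
    have hle := List.pairwise_iff_getElem.mp hp i j (by omega) (by omega) hlt
    rw [List.getElem?_eq_getElem (by omega)] at hi
    rw [List.getElem?_eq_getElem (by omega)] at hjj
    injection hi with hi
    injection hjj with hjj
    rw [← hi, ← hjj]
    exact hle

-- B's chain body appends one classified element per step: the fold is a map
theorem pv_foldl_chain (t0 t1 t2 t3 : Int) (l : List Int) (init : List Int) :
    l.foldl (fun result v =>
      if v ≤ 0 then result ++ [1]
      else if v ≤ t0 then result ++ [1]
      else if v ≤ t1 then result ++ [2]
      else if v ≤ t2 then result ++ [3]
      else if v ≤ t3 then result ++ [4]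
      else result ++ [5]) init
    = init ++ l.map (fun v => if v ≤ 0 then (1 : Int) else if v ≤ t0 then 1 else if v ≤ t1 then 2
        else if v ≤ t2 then 3 else if v ≤ t3 then 4 else 5) := by
  induction l generalizing init with
  | nil => simp
  | cons v t ih =>
    simp only [List.foldl_cons, List.map_cons]
    rw [ih]
    split_ifs <;> simp

-- getElem! on a four-element literal list
theorem pv_get0 (a b c d : Int) : ([a, b, c, d] : List Int)[0]! = a := rfl
theorem pv_get1 (a b c d : Int) : ([a, b, c, d] : List Int)[1]! = b := rfl
theorem pv_get2 (a b c d : Int) : ([a, b, c, d] : List Int)[2]! = c := rfl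
theorem pv_get3 (a b c d : Int) : ([a, b, c, d] : List Int)[3]! = d := rfl

-- the if-chain against sorted thresholds equals 1 + (number of thresholds below v)
theorem pv_classify_eq (t0 t1 t2 t3 v : Int) (h01 : t0 ≤ t1) (h12 : t1 ≤ t2) (h23 : t2 ≤ t3) :
    (if v ≤ 0 then (1 : Int) else if v ≤ t0 then 1 else if v ≤ t1 then 2 else if v ≤ t2 then 3
      else if v ≤ t3 then 4 else 5)
    = (if v ≤ 0 then 1
       else 1 + ([t0, t1, t2, t3].foldl (fun acc t => acc + (if t < v then 1 else 0)) 0)) := by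
  simp only [List.foldl_cons, List.foldl_nil]
  split_ifs <;> omega

-- ===== VERDICT (by name: the statement is the Claim_ definition above) =====
theorem quintile_class_list_py_spec : Claim_equal_quintile_class_list_py := by
  intro values _
  unfold Spec_quintile_class_list_py
  simp only [quintile_class_list_py, quintile_class_list_py_alt]
  by_cases h0 : values = []
  · simp [h0]
  · rw [if_neg h0, if_neg h0]
    by_cases hnz : values.filter (fun v => decide (0 < v)) = []
    · rw [if_pos ((PySem.List.sorted_eq_nil_iff _ _ _).mpr hnz),
        if_pos (show (((values.filter (fun v => decide (0 < v))).length : Int)) = 0 by rw [hnz]; rfl)]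
    · rw [if_neg (show ¬ (PySem.List.sorted (values.filter (fun v => decide (0 < v))) (fun x => x) false = []) by
          exact fun hc => hnz ((PySem.List.sorted_eq_nil_iff _ _ _).mp hc)),
        if_neg (show ¬ (((values.filter (fun v => decide (0 < v))).length : Int)) = 0 by
          simpa [List.length_eq_zero_iff] using hnz)]
      generalize hFg : values.filter (fun v => decide (0 < v)) = F
      rw [hFg] at hnz
      have hnzlen : 0 < F.length := List.length_pos_of_ne_nil hnz
      have hfd : ∀ a : Int, PySem.Int.floordiv a 100 = a / 100 :=
        fun a => PySem.Int.floordiv_eq_ediv_of_pos (by norm_num)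
      have hSlen : (PySem.List.sorted F (fun x => x) false).length = F.length := by
        rw [PySem.List.length_sorted]
      have ht20 := pv_threshold_eq F (max 0 (PySem.Int.floordiv (20 * (F.length : Int)) 100 - 1))
        (le_max_left _ _) (by simp only [hfd]; omega)
      have ht40 := pv_threshold_eq F (max 0 (PySem.Int.floordiv (40 * (F.length : Int)) 100 - 1))
        (le_max_left _ _) (by simp only [hfd]; omega)
      have ht60 := pv_threshold_eq F (max 0 (PySem.Int.floordiv (60 * (F.length : Int)) 100 - 1))
        (le_max_left _ _) (by simp only [hfd]; omega)
      have ht80 := pv_threshold_eq F (max 0 (PySem.Int.floordiv (80 * (F.length : Int)) 100 - 1))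
        (le_max_left _ _) (by simp only [hfd]; omega)
      have h01 := pv_select_mono F (max 0 (PySem.Int.floordiv (20 * (F.length : Int)) 100 - 1)).toNat
        (max 0 (PySem.Int.floordiv (40 * (F.length : Int)) 100 - 1)).toNat
        (by simp only [hfd]; omega) (by simp only [hfd]; omega)
      have h12 := pv_select_mono F (max 0 (PySem.Int.floordiv (40 * (F.length : Int)) 100 - 1)).toNat
        (max 0 (PySem.Int.floordiv (60 * (F.length : Int)) 100 - 1)).toNat
        (by simp only [hfd]; omega) (by simp only [hfd]; omega)
      have h23 := pv_select_mono F (max 0 (PySem.Int.floordiv (60 * (F.length : Int)) 100 - 1)).toNat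
        (max 0 (PySem.Int.floordiv (80 * (F.length : Int)) 100 - 1)).toNat
        (by simp only [hfd]; omega) (by simp only [hfd]; omega)
      simp only [List.map_cons, List.map_nil]
      simp only [pv_get0, pv_get1, pv_get2, pv_get3]
      simp only [hSlen]
      rw [pv_foldl_chain, List.nil_append]
      apply List.map_congr_left
      intro v _
      rw [ht20, ht40, ht60, ht80]
      exact pv_classify_eq _ _ _ _ v h01 h12 h23
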